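-- pv_equiv track=rewrite | github.com/Aasthaengg/IBMdataset | Python_codes/p03745/s048864173.py | solve
-- ===== SOURCE A (Python) =====
-- def solve(N, A):
--     B = [A[0]]
--     prev = A[0]
--     for a in A:
--         if prev != a:
--             B.append(a)
--             prev = a
--     count = 1
--     up = False
--     down = False
--     for i in range(1, len(B)):
--         if not up and not down:
--             if B[i-1] < B[i]:
--                 up = True
--             else:
--                 down = True
--         elif up and B[i-1] > B[i]:
--             up = False
--             count += 1
--         elif down and B[i-1] < B[i]:
--             down = False
--             count += 1
--     return count
-- ===== SOURCE B (Python) =====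
-- def solve(N, A):
--     b = [A[0]]
--     for a in A[1:]:
--         if a != b[-1]:
--             b.append(a)
--     signs = [b[i] < b[i + 1] for i in range(len(b) - 1)]
--     count = 1
--     i = 1
--     while i < len(signs):
--         if signs[i] != signs[i - 1]:
--             count += 1
--             i += 2  # the sign right after a break only seeds the new direction
--         else:
--             i += 1
--     return count
-- ===== Notes on version B (the rewrite author's own statement) =====
-- stated objective: alternative
-- what changed: B replaces A's inline up/down boolean-flag state machine by materializing an explicit direction table (signs) over the consecutively-deduped list and counting direction breaks with a skip-2 pointer scan over that table.
-- outside the precondition, e.g. on solve(0, []): A raises IndexError, B raises IndexError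
import Mathlib
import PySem

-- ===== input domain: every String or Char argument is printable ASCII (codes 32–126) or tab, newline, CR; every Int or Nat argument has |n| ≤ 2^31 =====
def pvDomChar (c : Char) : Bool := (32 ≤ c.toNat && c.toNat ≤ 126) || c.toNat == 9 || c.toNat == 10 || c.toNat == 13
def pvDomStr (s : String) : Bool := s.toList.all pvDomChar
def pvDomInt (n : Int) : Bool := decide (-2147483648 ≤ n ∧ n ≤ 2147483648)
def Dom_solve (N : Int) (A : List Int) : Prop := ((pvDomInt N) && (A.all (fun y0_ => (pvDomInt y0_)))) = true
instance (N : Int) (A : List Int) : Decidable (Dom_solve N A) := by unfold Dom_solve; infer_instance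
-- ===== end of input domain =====

-- B replaces A's inline up/down flag state machine by a materialized boolean
-- direction table plus a skip-2 pointer scan counting direction breaks (objective: alternative).

-- ===== PORT A =====
def solve (N : Int) (A : List Int) : Int :=
  match A with
  | [] => 0   -- Python raises IndexError on A[0]; excluded by Pre_solve
  | a0 :: _ =>
    let Bp := (A.foldl (fun (s : List Int × Int) a =>
        if s.2 ≠ a then (s.1 ++ [a], a) else s) ([a0], a0)).1
    ((PySem.List.pyRange 1 (Bp.length : Int) 1).foldl (fun (st : Int × Bool × Bool) i =>
        if !st.2.1 && !st.2.2 then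
          (if PySem.List.pyGetD Bp (i-1) 0 < PySem.List.pyGetD Bp i 0
            then (st.1, true, st.2.2) else (st.1, st.2.1, true))
        else if st.2.1 && decide (PySem.List.pyGetD Bp (i-1) 0 > PySem.List.pyGetD Bp i 0) then
          (st.1 + 1, false, st.2.2)
        else if st.2.2 && decide (PySem.List.pyGetD Bp (i-1) 0 < PySem.List.pyGetD Bp i 0) then
          (st.1 + 1, st.2.1, false)
        else st) ((1 : Int), false, false)).1

-- ===== PORT B =====
-- the while-loop of Source B: compare signs[i] with signs[i-1]; on a break count and jump 2
def bLoop (signs : List Bool) (i : Nat) (count : Int) : Int :=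
  if _h : i < signs.length then
    if signs.getD i false ≠ signs.getD (i-1) false then bLoop signs (i+2) (count+1)
    else bLoop signs (i+1) count
  else count
termination_by signs.length - i

def solve_alt (N : Int) (A : List Int) : Int :=
  match A with
  | [] => 0   -- Python raises IndexError on A[0]; excluded by Pre_solve
  | a0 :: _ =>
    let b := (PySem.List.slice A (some 1) none).foldl (fun (b : List Int) a =>
        if a ≠ PySem.List.pyGetD b (-1) 0 then b ++ [a] else b) [a0]
    let signs := (PySem.List.pyRange 0 ((b.length : Int) - 1) 1).map
        (fun i => decide (PySem.List.pyGetD b i 0 < PySem.List.pyGetD b (i+1) 0))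
    bLoop signs 1 1

-- ===== PRECONDITION & SPEC =====
-- Pre_ excludes only the empty list, on which Python A raises IndexError (B raises too).
def Pre_solve (N : Int) (A : List Int) : Prop := A ≠ []
instance (N : Int) (A : List Int) : Decidable (Pre_solve N A) := by unfold Pre_solve; infer_instance
def pvWitness_solve : Int × List Int := (4, [1, 3, 2, 2])

def Spec_solve (N : Int) (A : List Int) (out : Int) : Prop := out = solve_alt N A
instance (N : Int) (A : List Int) (out : Int) : Decidable (Spec_solve N A out) := by unfold Spec_solve; infer_instance

-- ===== CLAIM (what is proved, stated in full; the proofs are below) =====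
def Claim_equal_solve : Prop := ∀ (N : Int) (A : List Int), Dom_solve N A → Pre_solve N A → Spec_solve N A (solve N A)

-- ===== LEMMAS AND PROOFS =====

-- canonical consecutive-dedup of l continuing after prev element p
def ded (p : Int) : List Int → List Int
  | [] => []
  | a :: l => if p ≠ a then a :: ded a l else ded p l

-- final prev of A's dedup loop
def dlast (p : Int) : List Int → Int
  | [] => p
  | a :: l => if p ≠ a then dlast a l else dlast p l

-- direction table of a list: sign of each adjacent pair
def sgns (C : List Int) : List Bool := List.zipWith (fun x y => decide (x < y)) C C.tail

-- run counter on a sign list with A's "reset after a break" rule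
def g : List Bool → Int
  | [] => 0
  | [_] => 0
  | p :: c :: rest => if p ≠ c then 1 + g rest else g (c :: rest)
termination_by l => l.length

-- the sign-level step of A's state machine
def stepS (st : Int × Bool × Bool) (s : Bool) : Int × Bool × Bool :=
  if !st.2.1 && !st.2.2 then (if s then (st.1, true, st.2.2) else (st.1, st.2.1, true))
  else if st.2.1 && !s then (st.1 + 1, false, st.2.2)
  else if st.2.2 && s then (st.1 + 1, st.2.1, false)
  else st

theorem foldlA_eq (l : List Int) : ∀ (acc : List Int) (p : Int),
    l.foldl (fun (s : List Int × Int) a => if s.2 ≠ a then (s.1 ++ [a], a) else s) (acc, p)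
      = (acc ++ ded p l, dlast p l) := by
  induction l with
  | nil => intro acc p; simp [ded, dlast]
  | cons a l ih =>
    intro acc p
    rw [List.foldl_cons]
    by_cases h : p = a
    · subst h
      rw [if_neg (by simp), ih]
      simp [ded, dlast]
    · rw [if_pos (by simpa using h), ih]
      simp [ded, dlast, h]

theorem foldlB_eq (l : List Int) : ∀ (acc : List Int) (p : Int),
    l.foldl (fun (b : List Int) a =>
        if a ≠ PySem.List.pyGetD b (-1) 0 then b ++ [a] else b) (acc ++ [p])
      = (acc ++ [p]) ++ ded p l := by
  induction l with
  | nil => intro acc p; simp [ded]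
  | cons a l ih =>
    intro acc p
    rw [List.foldl_cons, PySem.List.pyGetD_neg_one_append_singleton]
    by_cases h : a = p
    · subst h
      rw [if_neg (by simp), ih]
      simp [ded]
    · rw [if_pos (by simpa using h), ih]
      have hpa : p ≠ a := fun hh => h hh.symm
      simp [ded, hpa]

theorem chain_ded (l : List Int) : ∀ p : Int, List.IsChain (· ≠ ·) (p :: ded p l) := by
  induction l with
  | nil => intro p; simp [ded]
  | cons a l ih =>
    intro p
    by_cases h : p = a
    · simpa [ded, h] using ih a
    · have hc := ih a
      simp only [ded, if_pos (by simpa using h)]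
      exact List.isChain_cons.2 ⟨by intro y hy; simp at hy; subst hy; simpa using h, hc⟩

theorem g_short (l : List Bool) (h : l.length ≤ 1) : g l = 0 := by
  match l with
  | [] => simp [g]
  | [_] => simp [g]
  | _ :: _ :: _ => simp at h

theorem sgns_short (C : List Int) (h : C.length ≤ 1) : sgns C = [] := by
  match C with
  | [] => rfl
  | [_] => rfl
  | _ :: _ :: _ => simp at h

theorem sgns_drop (C : List Int) (k : Nat) (h : k + 1 < C.length) :
    sgns (C.drop k) = decide (C[k] < C[k+1]) :: sgns (C.drop (k+1)) := by
  have h1 : C.drop k = C[k] :: C.drop (k+1) := List.drop_eq_getElem_cons (by omega)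
  have h2 : C.drop (k+1) = C[k+1] :: C.drop (k+2) := List.drop_eq_getElem_cons (by omega)
  simp only [sgns, List.tail_drop]
  rw [h1, h2, List.zipWith_cons_cons]

theorem machine_g (l : List Bool) :
    (∀ c : Int, (l.foldl stepS (c, false, false)).1 = c + g l) ∧
    (∀ (d : Bool) (c : Int), (l.foldl stepS (c, d, !d)).1 = c + g (d :: l)) := by
  induction l with
  | nil => exact ⟨by intro c; simp [g], by intro d c; simp [g]⟩
  | cons s rest ih =>
    constructor
    · intro c
      have h1 : stepS (c, false, false) s = (c, s, !s) := by
        cases s <;> simp [stepS]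
      rw [List.foldl_cons, h1]
      exact ih.2 s c
    · intro d c
      by_cases hs : s = d
      · subst hs
        have h1 : stepS (c, s, !s) s = (c, s, !s) := by cases s <;> simp [stepS]
        rw [List.foldl_cons, h1]
        have := ih.2 s c
        rw [this]
        have : g (s :: s :: rest) = g (s :: rest) := by simp [g]
        rw [this]
      · have hd : s = !d := by cases s <;> cases d <;> simp_all
        subst hd
        have h1 : stepS (c, d, !d) (!d) = (c + 1, false, false) := by
          cases d <;> simp [stepS]
        rw [List.foldl_cons, h1]
        have h2 := ih.1 (c + 1)
        rw [h2]
        have h3 : g (d :: (!d) :: rest) = 1 + g rest := by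
          cases d <;> simp [g]
        rw [h3]
        ring

theorem bLoop_eq (signs : List Bool) :
    ∀ (m i : Nat) (count : Int), signs.length - i ≤ m → 1 ≤ i →
      bLoop signs i count = count + g (signs.drop (i-1)) := by
  intro m
  induction m with
  | zero =>
    intro i count hm hi
    rw [bLoop]
    rw [dif_neg (by omega)]
    rw [g_short _ (by simp; omega)]
    ring
  | succ n ih =>
    intro i count hm hi
    rw [bLoop]
    by_cases h : i < signs.length
    · rw [dif_pos h]
      have hg1 : signs.getD i false = signs[i] := List.getD_eq_getElem _ _ h
      have hg2 : signs.getD (i-1) false = signs[i-1] := List.getD_eq_getElem _ _ (by omega)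
      have hd1 : signs.drop (i-1) = signs[i-1] :: signs.drop i := by
        have h0 := List.drop_eq_getElem_cons (l := signs) (i := i-1) (by omega)
        have e : i - 1 + 1 = i := by omega
        rw [h0, e]
      have hd2 : signs.drop i = signs[i] :: signs.drop (i+1) :=
        List.drop_eq_getElem_cons (by omega)
      rw [hg1, hg2]
      by_cases hne : signs[i] = signs[i-1]
      · rw [if_neg (by simpa using hne)]
        rw [ih (i+1) count (by omega) (by omega)]
        have : signs.drop (i+1-1) = signs.drop i := by congr 1
        rw [this, hd2, hd1, hd2]
        have : g (signs[i-1] :: signs[i] :: signs.drop (i+1))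
             = g (signs[i] :: signs.drop (i+1)) := by
          simp [g, hne]
        rw [this]
      · rw [if_pos (by simpa using hne)]
        rw [ih (i+2) (count+1) (by omega) (by omega)]
        have : signs.drop (i+2-1) = signs.drop (i+1) := by congr 1
        rw [this, hd1, hd2]
        have : g (signs[i-1] :: signs[i] :: signs.drop (i+1))
             = 1 + g (signs.drop (i+1)) := by
          rw [g]; rw [if_pos (fun hh => hne hh.symm)]
        rw [this]
        ring
    · rw [dif_neg h]
      rw [g_short _ (by simp; omega)]
      ring

theorem foldA_idx (C : List Int) (hC : List.IsChain (· ≠ ·) C) :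
    ∀ (m k : Nat) (st : Int × Bool × Bool), C.length - (k+1) ≤ m →
      (PySem.List.pyRange ((k : Int)+1) (C.length : Int) 1).foldl (fun (st : Int × Bool × Bool) i =>
        if !st.2.1 && !st.2.2 then
          (if PySem.List.pyGetD C (i-1) 0 < PySem.List.pyGetD C i 0
            then (st.1, true, st.2.2) else (st.1, st.2.1, true))
        else if st.2.1 && decide (PySem.List.pyGetD C (i-1) 0 > PySem.List.pyGetD C i 0) then
          (st.1 + 1, false, st.2.2)
        else if st.2.2 && decide (PySem.List.pyGetD C (i-1) 0 < PySem.List.pyGetD C i 0) then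
          (st.1 + 1, st.2.1, false)
        else st) st
      = (sgns (C.drop k)).foldl stepS st := by
  intro m
  induction m with
  | zero =>
    intro k st hm
    rw [PySem.List.pyRange_one_eq_nil (by omega)]
    rw [sgns_short _ (by simp; omega)]
    simp
  | succ n ih =>
    intro k st hm
    by_cases h : k + 1 < C.length
    · rw [PySem.List.pyRange_one_cons (by omega)]
      rw [List.foldl_cons]
      have e1 : ((k : Int) + 1 - 1) = ((k : Nat) : Int) := by ring
      have e2 : ((k : Int) + 1) = (((k+1 : Nat)) : Int) := by push_cast; ring
      have hk : k < C.length := by omega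
      have hk1 : k + 1 < C.length := h
      have hv1 : PySem.List.pyGetD C ((k : Int) + 1 - 1) 0 = C[k] := by
        rw [e1, PySem.List.pyGetD_natCast, List.getD_eq_getElem _ _ hk]
      have hv2 : PySem.List.pyGetD C ((k : Int) + 1) 0 = C[k+1] := by
        rw [e2, PySem.List.pyGetD_natCast, List.getD_eq_getElem _ _ hk1]
      have hne : C[k] ≠ C[k+1] := List.isChain_iff_getElem.1 hC k (by omega)
      have hstep : (if !st.2.1 && !st.2.2 then
          (if PySem.List.pyGetD C ((k : Int)+1-1) 0 < PySem.List.pyGetD C ((k : Int)+1) 0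
            then (st.1, true, st.2.2) else (st.1, st.2.1, true))
        else if st.2.1 && decide (PySem.List.pyGetD C ((k : Int)+1-1) 0 > PySem.List.pyGetD C ((k : Int)+1) 0) then
          (st.1 + 1, false, st.2.2)
        else if st.2.2 && decide (PySem.List.pyGetD C ((k : Int)+1-1) 0 < PySem.List.pyGetD C ((k : Int)+1) 0) then
          (st.1 + 1, st.2.1, false)
        else st) = stepS st (decide (C[k] < C[k+1])) := by
        rw [hv1, hv2]
        by_cases hlt : C[k] < C[k+1]
        · simp [stepS, hlt, not_lt_of_gt hlt]
        · have hgt : C[k] > C[k+1] := lt_of_le_of_ne (le_of_not_gt hlt) (Ne.symm hne)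
          simp [stepS, hlt, hgt]
      rw [hstep]
      have e3 : ((k : Int) + 1 + 1) = (((k+1 : Nat)) : Int) + 1 := by push_cast; ring
      rw [e3, ih (k+1) _ (by omega)]
      rw [sgns_drop C k h]
      rfl
    · rw [PySem.List.pyRange_one_eq_nil (by omega)]
      rw [sgns_short _ (by simp; omega)]
      simp

-- B's sign table equals sgns of the deduped list
theorem signs_eq (b : List Int) :
    (PySem.List.pyRange 0 ((b.length : Int) - 1) 1).map
        (fun i => decide (PySem.List.pyGetD b i 0 < PySem.List.pyGetD b (i+1) 0))
      = sgns b := by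
  apply List.ext_getElem
  · simp only [List.length_map, PySem.List.length_pyRange_one, sgns, List.length_zipWith,
      List.length_tail]
    omega
  · intro k h1 h2
    have hk : k + 1 < b.length := by
      simp [sgns] at h2; omega
    simp only [List.getElem_map, PySem.List.getElem_pyRange_one, zero_add]
    have e2 : ((k : Nat) : Int) + 1 = (((k+1 : Nat)) : Int) := by push_cast; ring
    rw [e2, PySem.List.pyGetD_natCast, PySem.List.pyGetD_natCast,
        List.getD_eq_getElem _ _ (by omega), List.getD_eq_getElem _ _ hk]
    simp [sgns, List.getElem_zipWith, List.getElem_tail]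

-- ===== VERDICT (by name: the statement is the Claim_ definition above) =====
theorem solve_spec : Claim_equal_solve := by
  intro N A _ hpre
  unfold Spec_solve
  match A with
  | [] => exact absurd rfl hpre
  | a0 :: rest =>
    show solve N (a0 :: rest) = solve_alt N (a0 :: rest)
    rw [solve, solve_alt]
    have hded : (List.foldl (fun (s : List Int × Int) a => if s.2 ≠ a then (s.1 ++ [a], a) else s)
        ([a0], a0) (a0 :: rest)).1 = a0 :: ded a0 rest := by
      rw [List.foldl_cons]
      rw [if_neg (by simp)]
      rw [foldlA_eq]
      simp
    have hb : (PySem.List.slice (a0 :: rest) (some 1) none).foldl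
        (fun (b : List Int) a => if a ≠ PySem.List.pyGetD b (-1) 0 then b ++ [a] else b) [a0]
        = a0 :: ded a0 rest := by
      rw [PySem.List.slice_from_one]
      have := foldlB_eq rest [] a0
      simpa using this
    rw [hded, hb]
    set C := a0 :: ded a0 rest with hCdef
    rw [signs_eq C]
    have hchain : List.IsChain (· ≠ ·) C := chain_ded rest a0
    have hidx := foldA_idx C hchain C.length 0 ((1 : Int), false, false) (by omega)
    have e0 : ((0 : Nat) : Int) + 1 = (1 : Int) := by norm_num
    rw [e0] at hidx
    rw [show C.drop 0 = C from rfl] at hidx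
    rw [hidx]
    rw [(machine_g (sgns C)).1 1]
    rw [bLoop_eq (sgns C) (sgns C).length 1 1 (by omega) (by omega)]
    simp
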